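-- pv_equiv track=rewrite | github.com/iffiX/kb_encoder | encoder/dataset/glue.py | find_part
-- ===== SOURCE A (Python) =====
-- from typing import List
--
-- def find_part(part_lengths: List[int], part_names: List[str], index: int):
--     for part_index, part_length in enumerate(part_lengths):
--         if 0 <= index < part_length:
--             return part_names[part_index], index
--         index -= part_length
--     raise ValueError(
--         f"Index {index} is out of range of parts with lengths {part_lengths}"
--     )
-- ===== SOURCE B (Python) =====
-- from itertools import accumulate
-- from typing import List
--
--
-- def find_part(part_lengths: List[int], part_names: List[str], index: int):
--     # Absolute boundaries: part k covers the half-open interval [bounds[k], bounds[k+1]).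
--     bounds = list(accumulate(part_lengths, initial=0))
--     hits = [k for k in range(len(part_lengths)) if bounds[k] <= index < bounds[k + 1]]
--     if hits:
--         k = hits[0]
--         return part_names[k], index - bounds[k]
--     raise ValueError(
--         f"Index {index} is out of range of parts with lengths {part_lengths}"
--     )
-- ===== Notes on version B (the rewrite author's own statement) =====
-- stated objective: alternative
-- what changed: B precomputes the absolute part boundaries with accumulate and returns the first bucket whose half-open interval contains the raw index, instead of A's scan that destructively subtracts each length from the index; inputs where A raises (no part contains the index, or the matched part has no name) are outside Pre_.
import Mathlib
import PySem

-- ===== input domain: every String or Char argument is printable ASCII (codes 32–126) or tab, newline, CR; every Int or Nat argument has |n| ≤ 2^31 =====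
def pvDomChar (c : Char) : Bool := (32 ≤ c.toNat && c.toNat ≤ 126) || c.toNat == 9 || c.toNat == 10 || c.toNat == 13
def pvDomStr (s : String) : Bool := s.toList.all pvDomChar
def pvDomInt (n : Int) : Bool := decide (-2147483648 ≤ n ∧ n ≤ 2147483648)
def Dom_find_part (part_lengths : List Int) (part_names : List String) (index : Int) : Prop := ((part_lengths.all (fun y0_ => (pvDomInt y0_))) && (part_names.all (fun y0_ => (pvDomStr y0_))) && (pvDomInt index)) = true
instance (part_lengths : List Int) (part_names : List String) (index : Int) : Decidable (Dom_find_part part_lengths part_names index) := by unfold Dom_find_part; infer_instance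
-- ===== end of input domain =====

-- B builds the absolute part boundaries once (accumulate) and returns the first bucket whose
-- half-open interval contains the raw index (alternative decomposition, same answers on Pre_).

-- ===== PORT A =====
-- the for-loop over enumerate(part_lengths); none = the IndexError/ValueError (raising) paths
def findPartLoop (pn : List String) : List Int → Nat → Int → Option (String × Int)
  | [], _, _ => none
  | l :: ls, i, idx =>
    if 0 ≤ idx ∧ idx < l then (PySem.List.pyGet? pn (i : Int)).map (fun nm => (nm, idx))
    else findPartLoop pn ls (i + 1) (idx - l)

def find_part (part_lengths : List Int) (part_names : List String) (index : Int) : String × Int :=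
  (findPartLoop part_names part_lengths 0 index).getD ("", 0)

-- ===== PORT B =====
-- accumulate(part_lengths) after an initial value a: running sums
def scanFrom (a : Int) : List Int → List Int
  | [] => []
  | l :: ls => (a + l) :: scanFrom (a + l) ls

-- bounds = list(accumulate(part_lengths, initial=0))
def buildPrefix (part_lengths : List Int) : List Int :=
  0 :: scanFrom 0 part_lengths

-- hits = [k for k in range(len(part_lengths)) if bounds[k] <= index < bounds[k+1]]
def hitList (part_lengths : List Int) (index : Int) : List Nat :=
  (List.range part_lengths.length).filter (fun k =>
    decide (PySem.List.pyGetD (buildPrefix part_lengths) ((k : Nat) : Int) 0 ≤ index) &&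
    decide (index < PySem.List.pyGetD (buildPrefix part_lengths) (((k : Nat) : Int) + 1) 0))

def find_part_alt (part_lengths : List Int) (part_names : List String) (index : Int) : String × Int :=
  match (hitList part_lengths index).head? with
  | none => ("", 0)   -- the raising (ValueError) path
  | some k => ((PySem.List.pyGet? part_names ((k : Nat) : Int)).getD "",
               index - PySem.List.pyGetD (buildPrefix part_lengths) ((k : Nat) : Int) 0)

-- ===== PRECONDITION & SPEC =====
-- Exactly the inputs on which A returns: some part k contains the global index (A raises ValueError when
-- none does) and the matched part has a name (A raises IndexError otherwise) — the first hit k0 satisfies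
-- k0 ≤ k, so asking any hit to have a name is equivalent.
def Pre_find_part (part_lengths : List Int) (part_names : List String) (index : Int) : Prop :=
  ∃ k ∈ List.range part_lengths.length,
    ((part_lengths.take k).sum ≤ index ∧ index < (part_lengths.take (k + 1)).sum) ∧ k < part_names.length
instance (part_lengths : List Int) (part_names : List String) (index : Int) : Decidable (Pre_find_part part_lengths part_names index) := by unfold Pre_find_part; infer_instance
def pvWitness_find_part : List Int × List String × Int := ([2, 0, 3], ["a", "b", "c"], 3)

def Spec_find_part (part_lengths : List Int) (part_names : List String) (index : Int) (out : String × Int) : Prop := out = find_part_alt part_lengths part_names index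
instance (part_lengths : List Int) (part_names : List String) (index : Int) (out : String × Int) : Decidable (Spec_find_part part_lengths part_names index out) := by unfold Spec_find_part; infer_instance

-- ===== CLAIM (what is proved, stated in full; the proofs are below) =====
def Claim_equal_find_part : Prop := ∀ (part_lengths : List Int) (part_names : List String) (index : Int), Dom_find_part part_lengths part_names index → Pre_find_part part_lengths part_names index → Spec_find_part part_lengths part_names index (find_part part_lengths part_names index)

-- ===== LEMMAS AND PROOFS =====

theorem scanFrom_shift (pl : List Int) : ∀ (a b : Int), scanFrom (a + b) pl = (scanFrom b pl).map (a + ·) := by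
  induction pl with
  | nil => intro a b; rfl
  | cons l ls ih =>
    intro a b
    simp only [scanFrom, List.map_cons]
    rw [show a + b + l = a + (b + l) by ring, ih a (b + l)]

theorem getD_map_add (s : List Int) (l : Int) (k : Nat) (hk : k < s.length) :
    (s.map (l + ·)).getD k 0 = l + s.getD k 0 := by
  rw [List.getD_eq_getElem _ _ (by simpa using hk), List.getD_eq_getElem _ _ hk]
  simp

theorem scanFrom_cons_map (l : Int) (ls : List Int) :
    scanFrom 0 (l :: ls) = (0 :: scanFrom 0 ls).map (l + ·) := by
  have h : scanFrom l ls = (scanFrom 0 ls).map (l + ·) := by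
    simpa using scanFrom_shift ls l 0
  simp [scanFrom, h]

theorem scanFrom_length (pl : List Int) : ∀ (a : Int), (scanFrom a pl).length = pl.length := by
  induction pl with
  | nil => intro a; rfl
  | cons l ls ih => intro a; simp [scanFrom, ih]

theorem bounds_get (pl : List Int) : ∀ (k : Nat), k ≤ pl.length →
    PySem.List.pyGetD (buildPrefix pl) ((k : Nat) : Int) 0 = (pl.take k).sum := by
  induction pl with
  | nil =>
    intro k hk
    have hk0 : k = 0 := by simpa using hk
    subst hk0
    simp [buildPrefix, scanFrom]
  | cons l ls ih =>
    intro k hk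
    rw [buildPrefix, PySem.List.pyGetD_natCast]
    match k with
    | 0 => simp
    | k + 1 =>
      rw [List.getD_cons_succ, scanFrom_cons_map]
      have hk' : k ≤ ls.length := by simpa using hk
      have hlen : k < (0 :: scanFrom 0 ls).length := by
        simp [scanFrom_length]; omega
      rw [getD_map_add _ _ _ hlen]
      have := ih k hk'
      rw [buildPrefix, PySem.List.pyGetD_natCast] at this
      rw [this]
      simp [List.sum_cons]

-- the Bool bucket test of the Python comprehension
theorem hit_pred_iff (pl : List Int) (idx : Int) (k : Nat) (hk : k < pl.length) :
    ((decide (PySem.List.pyGetD (buildPrefix pl) ((k : Nat) : Int) 0 ≤ idx) &&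
      decide (idx < PySem.List.pyGetD (buildPrefix pl) (((k : Nat) : Int) + 1) 0)) = true) ↔
    ((pl.take k).sum ≤ idx ∧ idx < (pl.take (k + 1)).sum) := by
  rw [show (((k : Nat) : Int) + 1) = (((k + 1 : Nat)) : Int) by push_cast; ring]
  rw [bounds_get pl k (by omega), bounds_get pl (k + 1) (by omega)]
  simp

theorem hitList_cons (l : Int) (ls : List Int) (idx : Int) :
    hitList (l :: ls) idx =
      (if 0 ≤ idx ∧ idx < l then [0] else []) ++ (hitList ls (idx - l)).map (· + 1) := by
  have hcong : ∀ k ∈ List.range ls.length,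
      ((fun k => decide (PySem.List.pyGetD (buildPrefix (l :: ls)) ((k : Nat) : Int) 0 ≤ idx) &&
        decide (idx < PySem.List.pyGetD (buildPrefix (l :: ls)) (((k : Nat) : Int) + 1) 0)) ∘ Nat.succ) k =
      (fun k => decide (PySem.List.pyGetD (buildPrefix ls) ((k : Nat) : Int) 0 ≤ (idx - l)) &&
        decide ((idx - l) < PySem.List.pyGetD (buildPrefix ls) (((k : Nat) : Int) + 1) 0)) k := by
    intro k hk
    have hklt : k < ls.length := List.mem_range.mp hk
    simp only [Function.comp, Nat.succ_eq_add_one]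
    rw [Bool.eq_iff_iff]
    rw [hit_pred_iff (l :: ls) idx (k + 1) (by simp; omega),
        hit_pred_iff ls (idx - l) k hklt]
    simp only [List.take_succ_cons, List.sum_cons]
    omega
  unfold hitList
  rw [show (l :: ls).length = ls.length + 1 from rfl, List.range_succ_eq_map,
      List.filter_cons, List.filter_map, List.filter_congr hcong]
  have b0 : PySem.List.pyGetD (buildPrefix (l :: ls)) 0 0 = 0 := by
    simp [buildPrefix, PySem.List.pyGetD_zero_cons]
  have b1 : PySem.List.pyGetD (buildPrefix (l :: ls)) 1 0 = l := by
    simpa using bounds_get (l :: ls) 1 (by simp)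
  by_cases hc : 0 ≤ idx ∧ idx < l
  · simp [b0, b1, hc]
  · simp [b0, b1, hc]

theorem main_loop (pl : List Int) : ∀ (pn : List String) (i : Nat) (idx : Int),
    findPartLoop pn pl i idx =
      (hitList pl idx).head?.bind (fun k =>
        (PySem.List.pyGet? pn (((i + k : Nat)) : Int)).map
          (fun nm => (nm, idx - PySem.List.pyGetD (buildPrefix pl) ((k : Nat) : Int) 0))) := by
  induction pl with
  | nil => intro pn i idx; rfl
  | cons l ls ih =>
    intro pn i idx
    rw [hitList_cons]
    simp only [findPartLoop]
    split_ifs with h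
    · simp only [List.singleton_append, List.head?_cons, Option.bind_some]
      rw [bounds_get (l :: ls) 0 (by simp)]
      simp
    · rw [ih pn (i + 1) (idx - l)]
      simp only [List.nil_append, List.head?_map]
      cases hh : (hitList ls (idx - l)).head? with
      | none => rfl
      | some k =>
        have hkmem : k ∈ hitList ls (idx - l) := by
          rcases List.head?_eq_some_iff.mp hh with ⟨t, ht⟩
          simp [ht]
        have hklt : k < ls.length := by
          have := List.mem_filter.mp hkmem
          exact List.mem_range.mp this.1
        simp only [Option.map_some, Option.bind_some]
        rw [show (i + 1) + k = i + (k + 1) by omega]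
        rw [bounds_get ls k (by omega), bounds_get (l :: ls) (k + 1) (by simp; omega)]
        simp only [List.take_succ_cons, List.sum_cons]
        rw [show idx - (l + (ls.take k).sum) = idx - l - (ls.take k).sum by ring]

theorem head_filter_le (p : Nat → Bool) (n k k0 : Nat) (hk : k ∈ (List.range n).filter p)
    (h0 : ((List.range n).filter p).head? = some k0) : k0 ≤ k := by
  have hs : ((List.range n).filter p).Pairwise (· < ·) :=
    List.Pairwise.sublist List.filter_sublist List.pairwise_lt_range
  rcases List.head?_eq_some_iff.mp h0 with ⟨t, ht⟩
  rw [ht] at hk hs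
  rcases List.mem_cons.mp hk with rfl | hmem
  · omega
  · have := (List.pairwise_cons.mp hs).1 k hmem
    omega

-- ===== VERDICT (by name: the statement is the Claim_ definition above) =====
theorem find_part_spec : Claim_equal_find_part := by
  intro pl pn idx _ hpre
  obtain ⟨k, hkr, hcond, hklen⟩ := hpre
  have hklt : k < pl.length := List.mem_range.mp hkr
  have hkhit : k ∈ hitList pl idx := by
    unfold hitList
    exact List.mem_filter.mpr ⟨hkr, (hit_pred_iff pl idx k hklt).mpr hcond⟩
  cases hh : (hitList pl idx).head? with
  | none =>
    rcases List.head?_eq_none_iff.mp hh with hnil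
    rw [hnil] at hkhit
    simp at hkhit
  | some k0 =>
    have hle : k0 ≤ k := head_filter_le _ _ k k0 hkhit hh
    have hk0len : k0 < pn.length := by omega
    have hget : PySem.List.pyGet? pn ((k0 : Nat) : Int) = some pn[k0] := by
      rw [PySem.List.pyGet?_natCast]
      exact List.getElem?_eq_getElem hk0len
    unfold Spec_find_part find_part find_part_alt
    rw [main_loop pl pn 0 idx, hh]
    simp only [Option.bind_some, Nat.zero_add, hget]
    rfl
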